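-- pv_equiv track=rewrite | github.com/ZacWhittaker/Models.py | schelling_model.py | all_possible_swaps
-- ===== SOURCE A (Python) =====
-- from copy import deepcopy
--
-- def all_possible_swaps(array):
--     permutations = []
--     for i in range(len(array)):
--         for j in range(len(array)):
--             if i == j:
--                 continue
--             else:
--                 current = deepcopy(array)
--                 current[i], current[j] = current[j], current[i]
--                 permutations.append(current)
--
--     permutations = [array] + permutations
--     return_list = []
--     seen = set()
--     for item in permutations:
--         t = tuple(item)
--
--         if t not in seen:
--             return_list.append(item)
--             seen.add(t)
--     return return_list
-- ===== SOURCE B (Python) =====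
-- def all_possible_swaps(array):
--     result = [array]
--     n = len(array)
--     for i in range(n):
--         for j in range(i + 1, n):
--             if array[i] != array[j]:
--                 cur = array[:]
--                 cur[i], cur[j] = cur[j], cur[i]
--                 result.append(cur)
--     return result
-- ===== Notes on version B (the rewrite author's own statement) =====
-- stated objective: faster
-- what changed: Replaces A's build-all-n(n-1)-swaps-with-deepcopy-then-dedup-via-tuple-hashing two-phase structure with a single triangular pass (j > i) that skips equal-valued positions, so each distinct result is constructed exactly once, by slice copy, and no dedup pass or seen-set exists at all.
import Mathlib
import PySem

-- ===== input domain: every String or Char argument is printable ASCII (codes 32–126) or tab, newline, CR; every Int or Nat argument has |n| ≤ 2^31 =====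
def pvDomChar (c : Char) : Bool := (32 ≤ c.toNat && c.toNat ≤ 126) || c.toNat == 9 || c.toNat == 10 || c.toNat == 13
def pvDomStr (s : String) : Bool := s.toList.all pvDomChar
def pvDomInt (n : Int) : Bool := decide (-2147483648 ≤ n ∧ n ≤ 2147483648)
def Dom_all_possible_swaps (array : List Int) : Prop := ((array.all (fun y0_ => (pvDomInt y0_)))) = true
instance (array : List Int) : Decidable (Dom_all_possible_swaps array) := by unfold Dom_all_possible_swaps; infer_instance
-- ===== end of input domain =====

-- B replaces A's build-all-swaps-then-dedup two-phase algorithm by a single triangular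
-- pass (j > i, skipping equal values) that emits each distinct array exactly once.

-- ===== PORT A =====
def all_possible_swaps (array : List Int) : List (List Int) :=
  let permutations : List (List Int) :=
    (PySem.List.pyRange 0 (array.length : Int) 1).foldl (fun perms i =>
      (PySem.List.pyRange 0 (array.length : Int) 1).foldl (fun perms j =>
        if i = j then perms
        else
          -- current = deepcopy(array); current[i], current[j] = current[j], current[i]
          let current := PySem.List.pySetD
              (PySem.List.pySetD array i (PySem.List.pyGetD array j 0)) j
              (PySem.List.pyGetD array i 0)
          perms ++ [current]) perms) []
  let permutations := array :: permutations
  (permutations.foldl (fun (st : List (List Int) × PySem.Set (List Int)) item =>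
      if PySem.Set.contains st.2 item then st
      else (st.1 ++ [item], PySem.Set.add st.2 item))
    ([], PySem.Set.empty)).1

-- ===== PORT B =====
def all_possible_swaps_alt (array : List Int) : List (List Int) :=
  (PySem.List.pyRange 0 (array.length : Int) 1).foldl (fun result i =>
    (PySem.List.pyRange (i + 1) (array.length : Int) 1).foldl (fun result j =>
      if PySem.List.pyGetD array i 0 ≠ PySem.List.pyGetD array j 0 then
        -- cur = array[:]; cur[i], cur[j] = cur[j], cur[i]
        let cur := PySem.List.pySetD
            (PySem.List.pySetD array i (PySem.List.pyGetD array j 0)) j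
            (PySem.List.pyGetD array i 0)
        result ++ [cur]
      else result) result) [array]

-- ===== PRECONDITION & SPEC =====
def Spec_all_possible_swaps (array : List Int) (out : List (List Int)) : Prop := out = all_possible_swaps_alt array
instance (array : List Int) (out : List (List Int)) : Decidable (Spec_all_possible_swaps array out) := by unfold Spec_all_possible_swaps; infer_instance

-- ===== CLAIM (what is proved, stated in full; the proofs are below) =====
def Claim_equal_all_possible_swaps : Prop := ∀ (array : List Int), Dom_all_possible_swaps array → Spec_all_possible_swaps array (all_possible_swaps array)

-- ===== LEMMAS AND PROOFS =====

-- the array obtained by swapping positions i and j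
def sw (a : List Int) (i j : Nat) : List Int := (a.set i (a.getD j 0)).set j (a.getD i 0)

-- the items A's row i appends, for the given list of j indices
def rowItems (a : List Int) (i : Nat) (js : List Nat) : List (List Int) :=
  js.flatMap (fun j => if i = j then [] else [sw a i j])

-- one step of A's dedup loop
def ddStep (st : List (List Int) × PySem.Set (List Int)) (item : List Int) :
    List (List Int) × PySem.Set (List Int) :=
  if PySem.Set.contains st.2 item then st
  else (st.1 ++ [item], PySem.Set.add st.2 item)

-- the swaps that survive A's dedup in row i (= the ones B constructs)
def keptRow (a : List Int) (n i : Nat) : List (List Int) :=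
  ((List.range' 0 n).filter (fun j => decide (i < j ∧ a.getD i 0 ≠ a.getD j 0))).map (fun j => sw a i j)

-- what A's seen-set contains after all rows k < s have been processed
def crossSeen (a : List Int) (n s : Nat) (x : List Int) : Prop :=
  ∃ k l, k < s ∧ l < n ∧ l ≠ k ∧ a.getD k 0 ≠ a.getD l 0 ∧ sw a k l = x

-- what row i has added to the seen-set after its j < s pairs
def rowSeen (a : List Int) (i s : Nat) (x : List Int) : Prop :=
  ∃ l, l < s ∧ l ≠ i ∧ a.getD i 0 ≠ a.getD l 0 ∧ sw a i l = x

lemma length_sw (a : List Int) (i j : Nat) : (sw a i j).length = a.length := by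
  simp [sw]

lemma getElem_sw (a : List Int) (i j m : Nat) (hi : i < a.length) (hm : m < a.length) :
    (sw a i j)[m]'(by simpa [length_sw] using hm)
      = if m = j then a[i] else if m = i then a.getD j 0 else a[m] := by
  simp only [sw, List.getElem_set]
  rcases eq_or_ne m j with rfl | hmj
  · rw [if_pos rfl, if_pos rfl, List.getD_eq_getElem a 0 hi]
  · rw [if_neg (Ne.symm hmj), if_neg hmj]
    rcases eq_or_ne m i with rfl | hmi
    · simp
    · rw [if_neg (Ne.symm hmi), if_neg hmi]

lemma sw_eq_self_iff (a : List Int) (i j : Nat) (hij : i ≠ j)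
    (hi : i < a.length) (hj : j < a.length) :
    sw a i j = a ↔ a.getD i 0 = a.getD j 0 := by
  rw [List.getD_eq_getElem a 0 hi, List.getD_eq_getElem a 0 hj]
  constructor
  · intro h
    have h2 := getElem_sw a i j j hi hj
    rw [if_pos rfl] at h2
    calc a[i] = (sw a i j)[j]'(by rw [length_sw]; exact hj) := h2.symm
      _ = a[j] := by simp [h]
  · intro h
    apply List.ext_getElem (by simp [length_sw])
    intro m hm hm'
    rw [getElem_sw a i j m hi hm']
    rcases eq_or_ne m j with rfl | hmj
    · rw [if_pos rfl]; exact h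
    · rw [if_neg hmj]
      rcases eq_or_ne m i with rfl | hmi
      · rw [if_pos rfl, List.getD_eq_getElem a 0 hj]; exact h.symm
      · rw [if_neg hmi]

lemma sw_comm (a : List Int) (i j : Nat) (hij : i ≠ j) : sw a i j = sw a j i := by
  unfold sw
  exact List.set_comm _ _ hij

lemma sw_inj (a : List Int) (i j k l : Nat) (hij : i ≠ j) (hkl : k ≠ l)
    (hi : i < a.length) (hj : j < a.length) (hk : k < a.length) (hl : l < a.length)
    (hvkl : a.getD k 0 ≠ a.getD l 0)
    (heq : sw a i j = sw a k l) : (k = i ∧ l = j) ∨ (k = j ∧ l = i) := by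
  rw [List.getD_eq_getElem a 0 hk, List.getD_eq_getElem a 0 hl] at hvkl
  have key : ∀ m : Nat, m < a.length → m ≠ i → m ≠ j → (m = k ∨ m = l) → False := by
    intro m hm hmi hmj hmkl
    have hout : (sw a i j)[m]'(by rw [length_sw]; exact hm) = a[m] := by
      rw [getElem_sw a i j m hi hm, if_neg hmj, if_neg hmi]
    have hcross : (sw a i j)[m]'(by rw [length_sw]; exact hm)
        = (sw a k l)[m]'(by rw [length_sw]; exact hm) := by simp [heq]
    rcases hmkl with h | h
    · -- m = k, so (sw a k l)[m] = a[l]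
      have hml : m ≠ l := h ▸ hkl
      have hin : (sw a k l)[m]'(by rw [length_sw]; exact hm) = a[l] := by
        rw [getElem_sw a k l m hk hm, if_neg hml, if_pos h, List.getD_eq_getElem a 0 hl]
      have hml' : a[m] = a[l] := by rw [← hout, hcross, hin]
      simp only [h] at hml'
      exact hvkl hml' 
    · -- m = l, so (sw a k l)[m] = a[k]
      have hin : (sw a k l)[m]'(by rw [length_sw]; exact hm) = a[k] := by
        rw [getElem_sw a k l m hk hm, if_pos h]
      have hmk' : a[m] = a[k] := by rw [← hout, hcross, hin]
      simp only [h] at hmk'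
      exact hvkl hmk'.symm
  have hkin : k = i ∨ k = j := by
    by_contra h
    exact key k hk (fun hh => h (Or.inl hh)) (fun hh => h (Or.inr hh)) (Or.inl rfl)
  have hlin : l = i ∨ l = j := by
    by_contra h
    exact key l hl (fun hh => h (Or.inl hh)) (fun hh => h (Or.inr hh)) (Or.inr rfl)
  rcases hkin with rfl | rfl <;> rcases hlin with rfl | rfl
  · exact absurd rfl hkl
  · exact Or.inl ⟨rfl, rfl⟩
  · exact Or.inr ⟨rfl, rfl⟩
  · exact absurd rfl hkl

-- pyRange over Nat casts is the mapped List.range'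
lemma pyRange_natCast' (s n : Nat) :
    PySem.List.pyRange (s : Int) (n : Int) 1 = (List.range' s (n - s)).map (Nat.cast : Nat → Int) := by
  apply List.ext_getElem
  · rw [PySem.List.length_pyRange_one, List.length_map, List.length_range']
    omega
  · intro k h1 h2
    rw [PySem.List.getElem_pyRange_one, List.getElem_map, List.getElem_range']
    omega

lemma pyRange_natCast0 (n : Nat) :
    PySem.List.pyRange 0 (n : Int) 1 = (List.range' 0 n).map (Nat.cast : Nat → Int) := by
  have := pyRange_natCast' 0 n
  simpa using this

-- A's inner loop flattens to rowItems
lemma foldl_rowItems (a : List Int) (i : Nat) :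
    ∀ (js : List Nat) (ps : List (List Int)),
      js.foldl (fun ps j => if i = j then ps else ps ++ [sw a i j]) ps = ps ++ rowItems a i js := by
  intro js
  induction js with
  | nil => intro ps; simp [rowItems]
  | cons j rest ih =>
      intro ps
      rcases eq_or_ne i j with rfl | hij
      · simp [rowItems, ih]
      · simp [rowItems, hij, ih]

lemma rowItems_cons (a : List Int) (i j : Nat) (js : List Nat) :
    rowItems a i (j :: js) = (if i = j then [] else [sw a i j]) ++ rowItems a i js := by
  simp [rowItems]

-- A's dedup over one row's items
lemma dd_row (a : List Int) (n i : Nat) (hn : n = a.length) (hi : i < n) :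
    ∀ (t s : Nat), s + t = n → ∀ (st : List (List Int) × PySem.Set (List Int)),
      (∀ x, x ∈ st.2 ↔ (x = a ∨ crossSeen a n i x ∨ rowSeen a i s x)) →
      ((rowItems a i (List.range' s t)).foldl ddStep st).1
          = st.1 ++ ((List.range' s t).filter (fun j => decide (i < j ∧ a.getD i 0 ≠ a.getD j 0))).map (fun j => sw a i j)
      ∧ ∀ x, x ∈ ((rowItems a i (List.range' s t)).foldl ddStep st).2
          ↔ (x = a ∨ crossSeen a n i x ∨ rowSeen a i n x) := by
  intro t
  induction t with
  | zero =>
      intro s hs st hseen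
      have : s = n := by omega
      subst this
      simp [rowItems, hseen]
  | succ t ih =>
      intro s hs st hseen
      have hsn : s < n := by omega
      rw [List.range'_succ]
      rcases eq_or_ne i s with rfl | his
      · -- j = i is skipped
        rw [rowItems_cons, if_pos rfl, List.nil_append]
        have hfil : decide (i < i ∧ a.getD i 0 ≠ a.getD i 0) = false := by
          simp only [decide_eq_false_iff_not]
          exact fun h => h.2 rfl
        rw [List.filter_cons, hfil]
        simp only [Bool.false_eq_true, if_false]
        apply ih (i + 1) (by omega) st
        intro x
        rw [hseen x]
        constructor
        · rintro (h | h | ⟨l, hl, hli, hv, hx⟩)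
          · exact Or.inl h
          · exact Or.inr (Or.inl h)
          · exact Or.inr (Or.inr ⟨l, by omega, hli, hv, hx⟩)
        · rintro (h | h | ⟨l, hl, hli, hv, hx⟩)
          · exact Or.inl h
          · exact Or.inr (Or.inl h)
          · exact Or.inr (Or.inr ⟨l, by omega, hli, hv, hx⟩)
      · -- the pair (i, s), a genuine item
        rw [rowItems_cons, if_neg his, List.singleton_append, List.foldl_cons]
        by_cases hv : a.getD i 0 = a.getD s 0
        · -- swap equals the original array: already seen
          have hx0 : sw a i s = a :=
            (sw_eq_self_iff a i s his (by omega) (by omega)).mpr hv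
          have hmem : sw a i s ∈ st.2 := (hseen _).mpr (Or.inl hx0)
          have hdd : ddStep st (sw a i s) = st := by
            have hc : PySem.Set.contains st.2 (sw a i s) = true :=
              (PySem.Set.contains_iff st.2 (sw a i s)).mpr hmem
            simp only [ddStep]
            rw [if_pos hc]
          rw [hdd]
          have hfil : decide (i < s ∧ a.getD i 0 ≠ a.getD s 0) = false := by
            simp only [decide_eq_false_iff_not]
            exact fun h => h.2 hv
          rw [List.filter_cons, hfil]
          simp only [Bool.false_eq_true, if_false]
          apply ih (s + 1) (by omega) st
          intro x
          rw [hseen x]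
          constructor
          · rintro (h | h | ⟨l, hl, hli, hvl, hx⟩)
            · exact Or.inl h
            · exact Or.inr (Or.inl h)
            · exact Or.inr (Or.inr ⟨l, by omega, hli, hvl, hx⟩)
          · rintro (h | h | ⟨l, hl, hli, hvl, hx⟩)
            · exact Or.inl h
            · exact Or.inr (Or.inl h)
            · rcases eq_or_ne l s with rfl | hls
              · exact absurd hv hvl
              · exact Or.inr (Or.inr ⟨l, by omega, hli, hvl, hx⟩)
        · rcases Nat.lt_or_ge s i with hsi | hsi
          · -- s < i: sw a i s was already produced as sw a s i in row s
            have hmem : sw a i s ∈ st.2 := by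
              refine (hseen _).mpr (Or.inr (Or.inl ⟨s, i, hsi, hi, his, ?_, ?_⟩))
              · exact fun h => hv h.symm
              · exact (sw_comm a i s his).symm
            have hdd : ddStep st (sw a i s) = st := by
              have hc : PySem.Set.contains st.2 (sw a i s) = true :=
                (PySem.Set.contains_iff st.2 (sw a i s)).mpr hmem
              simp only [ddStep]
              rw [if_pos hc]
            rw [hdd]
            have hfil : decide (i < s ∧ a.getD i 0 ≠ a.getD s 0) = false := by
              simp only [decide_eq_false_iff_not]
              exact fun h => absurd h.1 (by omega)
            rw [List.filter_cons, hfil]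
            simp only [Bool.false_eq_true, if_false]
            apply ih (s + 1) (by omega) st
            intro x
            rw [hseen x]
            constructor
            · rintro (h | h | ⟨l, hl, hli, hvl, hx⟩)
              · exact Or.inl h
              · exact Or.inr (Or.inl h)
              · exact Or.inr (Or.inr ⟨l, by omega, hli, hvl, hx⟩)
            · rintro (h | h | ⟨l, hl, hli, hvl, hx⟩)
              · exact Or.inl h
              · exact Or.inr (Or.inl h)
              · rcases eq_or_ne l s with rfl | hls
                · exact hx ▸ ((hseen _).mp hmem)
                · exact Or.inr (Or.inr ⟨l, by omega, hli, hvl, hx⟩)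
          · -- i < s: a brand-new item, kept
            have hsi' : i < s := by omega
            have hnotmem : sw a i s ∉ st.2 := by
              intro hmem
              rcases (hseen _).mp hmem with h | ⟨k, l, hk, hl, hlk, hvkl, hx⟩ | ⟨l, hl, hli, hvl, hx⟩
              · exact hv ((sw_eq_self_iff a i s his (by omega) (by omega)).mp h)
              · rcases sw_inj a k l i s hlk.symm his (by omega) (by omega) (by omega) (by omega) hv hx with ⟨h1, h2⟩ | ⟨h1, h2⟩
                · omega
                · omega
              · rcases sw_inj a i l i s (Ne.symm hli) his (by omega) (by omega) (by omega) (by omega) hv hx with ⟨h1, h2⟩ | ⟨h1, h2⟩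
                · omega
                · omega
            have hdd : ddStep st (sw a i s) = (st.1 ++ [sw a i s], PySem.Set.add st.2 (sw a i s)) := by
              have hc : ¬ (PySem.Set.contains st.2 (sw a i s) = true) :=
                fun h => hnotmem ((PySem.Set.contains_iff st.2 (sw a i s)).mp h)
              simp only [ddStep]
              rw [if_neg hc]
            rw [hdd]
            have hfil : decide (i < s ∧ a.getD i 0 ≠ a.getD s 0) = true := by
              simp only [decide_eq_true_eq]
              exact ⟨hsi', hv⟩
            rw [List.filter_cons, hfil]
            have hseen' : ∀ x, x ∈ PySem.Set.add st.2 (sw a i s) ↔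
                (x = a ∨ crossSeen a n i x ∨ rowSeen a i (s + 1) x) := by
              intro x
              simp only [PySem.Set.mem_add]
              rw [hseen x]
              constructor
              · rintro ((h | h | ⟨l, hl, hli, hvl, hx⟩) | rfl)
                · exact Or.inl h
                · exact Or.inr (Or.inl h)
                · exact Or.inr (Or.inr ⟨l, by omega, hli, hvl, hx⟩)
                · exact Or.inr (Or.inr ⟨s, by omega, Ne.symm his, hv, rfl⟩)
              · rintro (h | h | ⟨l, hl, hli, hvl, hx⟩)
                · exact Or.inl (Or.inl h)
                · exact Or.inl (Or.inr (Or.inl h))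
                · rcases eq_or_ne l s with rfl | hls
                  · exact Or.inr hx.symm
                  · exact Or.inl (Or.inr (Or.inr ⟨l, by omega, hli, hvl, hx⟩))
            obtain ⟨h1, h2⟩ := ih (s + 1) (by omega) (st.1 ++ [sw a i s], PySem.Set.add st.2 (sw a i s)) hseen'
            refine ⟨?_, h2⟩
            rw [h1]
            simp

-- A's dedup over all rows from s on
lemma dd_rows (a : List Int) (n : Nat) (hn : n = a.length) :
    ∀ (t s : Nat), s + t = n → ∀ (st : List (List Int) × PySem.Set (List Int)),
      (∀ x, x ∈ st.2 ↔ (x = a ∨ crossSeen a n s x)) →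
      (((List.range' s t).flatMap (fun i => rowItems a i (List.range' 0 n))).foldl ddStep st).1
        = st.1 ++ (List.range' s t).flatMap (fun i => keptRow a n i) := by
  intro t
  induction t with
  | zero =>
      intro s hs st hseen
      simp
  | succ t ih =>
      intro s hs st hseen
      have hsn : s < n := by omega
      rw [List.range'_succ]
      simp only [List.flatMap_cons, List.foldl_append]
      have hseen0 : ∀ x, x ∈ st.2 ↔ (x = a ∨ crossSeen a n s x ∨ rowSeen a s 0 x) := by
        intro x
        rw [hseen x]
        constructor
        · rintro (h | h)
          · exact Or.inl h
          · exact Or.inr (Or.inl h)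
        · rintro (h | h | ⟨l, hl, _, _, _⟩)
          · exact Or.inl h
          · exact Or.inr h
          · omega
      obtain ⟨h1, h2⟩ := dd_row a n s hn hsn n 0 (by omega) st hseen0
      have hseen1 : ∀ x, x ∈ (List.foldl ddStep st (rowItems a s (List.range' 0 n))).2 ↔
          (x = a ∨ crossSeen a n (s + 1) x) := by
        intro x
        rw [h2 x]
        constructor
        · rintro (h | ⟨k, l, hk, hl, hlk, hvkl, hx⟩ | ⟨l, hl, hli, hvl, hx⟩)
          · exact Or.inl h
          · exact Or.inr ⟨k, l, by omega, hl, hlk, hvkl, hx⟩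
          · exact Or.inr ⟨s, l, by omega, hl, hli, hvl, hx⟩
        · rintro (h | ⟨k, l, hk, hl, hlk, hvkl, hx⟩)
          · exact Or.inl h
          · rcases eq_or_ne k s with rfl | hks
            · exact Or.inr (Or.inr ⟨l, hl, hlk, hvkl, hx⟩)
            · exact Or.inr (Or.inl ⟨k, l, by omega, hl, hlk, hvkl, hx⟩)
      have hrest := ih (s + 1) (by omega) (List.foldl ddStep st (rowItems a s (List.range' 0 n))) hseen1
      rw [hrest, h1]
      simp [keptRow]

-- port A, normalized: dedup fold over the original followed by all row items
lemma A_norm (a : List Int) :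
    all_possible_swaps a
      = ((a :: (List.range' 0 a.length).flatMap (fun i => rowItems a i (List.range' 0 a.length))).foldl
          ddStep ([], PySem.Set.empty)).1 := by
  unfold all_possible_swaps
  rw [pyRange_natCast0 a.length]
  rw [List.foldl_map]
  have hstep : ∀ (ki : Nat) (perms : List (List Int)),
      ((List.range' 0 a.length).map (Nat.cast : Nat → Int)).foldl (fun perms j =>
        if (ki : Int) = j then perms
        else perms ++ [PySem.List.pySetD (PySem.List.pySetD a (ki : Int) (PySem.List.pyGetD a j 0)) j (PySem.List.pyGetD a (ki : Int) 0)]) perms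
      = perms ++ rowItems a ki (List.range' 0 a.length) := by
    intro ki perms
    rw [List.foldl_map]
    have hfun : (fun (perms : List (List Int)) (kj : Nat) =>
        if (ki : Int) = (kj : Int) then perms
        else perms ++ [PySem.List.pySetD (PySem.List.pySetD a (ki : Int) (PySem.List.pyGetD a (kj : Int) 0)) (kj : Int) (PySem.List.pyGetD a (ki : Int) 0)])
        = (fun perms kj => if ki = kj then perms else perms ++ [sw a ki kj]) := by
      funext perms kj
      simp [sw, Nat.cast_inj]
    rw [hfun]
    exact foldl_rowItems a ki (List.range' 0 a.length) perms
  have hfun2 : (fun (perms : List (List Int)) (ki : Nat) =>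
      ((List.range' 0 a.length).map (Nat.cast : Nat → Int)).foldl (fun perms j =>
        if (ki : Int) = j then perms
        else perms ++ [PySem.List.pySetD (PySem.List.pySetD a (ki : Int) (PySem.List.pyGetD a j 0)) j (PySem.List.pyGetD a (ki : Int) 0)]) perms)
      = (fun perms ki => perms ++ rowItems a ki (List.range' 0 a.length)) := by
    funext perms ki
    exact hstep ki perms
  rw [hfun2, PySem.List.foldl_append_eq_flatMap]
  rfl

-- B keeps, in row i, the swaps with j > i and differing values
lemma keptRow_eq (a : List Int) (n ki : Nat) :
    keptRow a n ki
      = ((List.range' (ki + 1) (n - (ki + 1))).filter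
          (fun j => decide (a.getD ki 0 ≠ a.getD j 0))).map (fun j => sw a ki j) := by
  unfold keptRow
  rcases Nat.lt_or_ge ki n with hki | hki
  · have hsplit : List.range' 0 n = List.range' 0 (ki + 1) ++ List.range' (ki + 1) (n - (ki + 1)) := by
      have h := List.range'_append_1 (s := 0) (m := ki + 1) (n := n - (ki + 1))
      rw [Nat.zero_add] at h
      rw [h]
      congr 1
      omega
    rw [hsplit, List.filter_append]
    have h1 : (List.range' 0 (ki + 1)).filter (fun j => decide (ki < j ∧ a.getD ki 0 ≠ a.getD j 0)) = [] := by
      rw [List.filter_eq_nil_iff]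
      intro j hj
      have := List.mem_range'_1.mp hj
      simp only [decide_eq_true_eq, not_and]
      intro h
      omega
    have h2 : (List.range' (ki + 1) (n - (ki + 1))).filter (fun j => decide (ki < j ∧ a.getD ki 0 ≠ a.getD j 0))
        = (List.range' (ki + 1) (n - (ki + 1))).filter (fun j => decide (a.getD ki 0 ≠ a.getD j 0)) := by
      apply List.filter_congr
      intro j hj
      have := List.mem_range'_1.mp hj
      simp only [decide_eq_decide]
      constructor
      · exact fun h => h.2
      · exact fun h => ⟨by omega, h⟩
    rw [h1, h2, List.nil_append]
  · have hz : n - (ki + 1) = 0 := by omega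
    rw [hz]
    have h1 : (List.range' 0 n).filter (fun j => decide (ki < j ∧ a.getD ki 0 ≠ a.getD j 0)) = [] := by
      rw [List.filter_eq_nil_iff]
      intro j hj
      have := List.mem_range'_1.mp hj
      simp only [decide_eq_true_eq, not_and]
      intro h
      omega
    rw [h1]
    simp

-- port B, normalized: the original followed by the kept swaps of each row
lemma B_norm (a : List Int) :
    all_possible_swaps_alt a = a :: (List.range' 0 a.length).flatMap (fun i => keptRow a a.length i) := by
  unfold all_possible_swaps_alt
  rw [pyRange_natCast0 a.length]
  rw [List.foldl_map]
  have hstep : ∀ (ki : Nat) (res : List (List Int)),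
      (PySem.List.pyRange ((ki : Int) + 1) (a.length : Int) 1).foldl (fun res j =>
        if PySem.List.pyGetD a (ki : Int) 0 ≠ PySem.List.pyGetD a j 0 then
          res ++ [PySem.List.pySetD (PySem.List.pySetD a (ki : Int) (PySem.List.pyGetD a j 0)) j (PySem.List.pyGetD a (ki : Int) 0)]
        else res) res
      = res ++ keptRow a a.length ki := by
    intro ki res
    have hc : ((ki : Int) + 1) = ((ki + 1 : Nat) : Int) := by push_cast; ring
    rw [hc, pyRange_natCast' (ki + 1) a.length, List.foldl_map]
    have hfun : (fun (res : List (List Int)) (kj : Nat) =>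
        if PySem.List.pyGetD a (ki : Int) 0 ≠ PySem.List.pyGetD a (kj : Int) 0 then
          res ++ [PySem.List.pySetD (PySem.List.pySetD a (ki : Int) (PySem.List.pyGetD a (kj : Int) 0)) (kj : Int) (PySem.List.pyGetD a (ki : Int) 0)]
        else res)
        = (fun res kj => if (fun kj => decide (a.getD ki 0 ≠ a.getD kj 0)) kj = true then res ++ [sw a ki kj] else res) := by
      funext res kj
      by_cases h : a.getD ki 0 = a.getD kj 0
      · simp [sw, h]
      · simp [sw, h]
    rw [hfun, PySem.List.foldl_append_if, keptRow_eq a a.length ki]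
  have hfun2 : (fun (res : List (List Int)) (ki : Nat) =>
      (PySem.List.pyRange ((ki : Int) + 1) (a.length : Int) 1).foldl (fun res j =>
        if PySem.List.pyGetD a (ki : Int) 0 ≠ PySem.List.pyGetD a j 0 then
          res ++ [PySem.List.pySetD (PySem.List.pySetD a (ki : Int) (PySem.List.pyGetD a j 0)) j (PySem.List.pyGetD a (ki : Int) 0)]
        else res) res)
      = (fun res ki => res ++ keptRow a a.length ki) := by
    funext res ki
    exact hstep ki res
  rw [hfun2, PySem.List.foldl_append_eq_flatMap]
  rfl

-- the dedup fold applied to a :: items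
lemma dd_full (a : List Int) :
    ((a :: (List.range' 0 a.length).flatMap (fun i => rowItems a i (List.range' 0 a.length))).foldl
        ddStep ([], PySem.Set.empty)).1
      = a :: (List.range' 0 a.length).flatMap (fun i => keptRow a a.length i) := by
  rw [List.foldl_cons]
  have h0 : ddStep ([], PySem.Set.empty) a = ([a], [a]) := by
    simp [ddStep, PySem.Set.empty, PySem.Set.contains, PySem.Set.add]
  rw [h0]
  have := dd_rows a a.length rfl a.length 0 (by omega) ([a], [a]) ?_
  · rw [this]
    simp
  · intro x
    constructor
    · intro hx
      exact Or.inl (by simpa using hx)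
    · rintro (rfl | ⟨k, l, hk, _, _, _, _⟩)
      · simp
      · omega

-- ===== VERDICT (by name: the statement is the Claim_ definition above) =====
theorem all_possible_swaps_spec : Claim_equal_all_possible_swaps := by
  intro array _
  unfold Spec_all_possible_swaps
  rw [A_norm, dd_full, B_norm]
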